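-- pv_equiv track=rewrite | github.com/user5427/MathAintMathing | T01/math2.py | shiftOccupation
-- ===== SOURCE A (Python) =====
-- def shiftOccupation(phones, calls):
--     if calls == []:
--         return []
--
--     lastWatcher = calls[-1]
--     if lastWatcher >= phones - 1:
--         backwardsShift = shiftOccupation(phones - 1, calls[:-1])
--         if backwardsShift == []:
--             return []
--         backwardsShift.append(backwardsShift[-1] + 1)
--         return backwardsShift
--     else:
--         calls[-1] += 1
--         return calls
-- ===== SOURCE B (Python) =====
-- def shiftOccupation(phones, calls):
--     n = len(calls)
--     i = n - 1
--     while i >= 0 and calls[i] >= phones - n + i: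
--         i -= 1
--     if i < 0:
--         return []
--     return calls[:i] + [calls[i] + 1 + k for k in range(n - i)]
-- ===== Notes on version B (the rewrite author's own statement) =====
-- stated objective: simpler
-- what changed: Replaced A's recursion that slices off the last element at every carry level with a single right-to-left scan locating the increment position followed by one forward pass that builds the cascaded suffix; B is shorter, non-recursive and does not mutate its argument.
import Mathlib
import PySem

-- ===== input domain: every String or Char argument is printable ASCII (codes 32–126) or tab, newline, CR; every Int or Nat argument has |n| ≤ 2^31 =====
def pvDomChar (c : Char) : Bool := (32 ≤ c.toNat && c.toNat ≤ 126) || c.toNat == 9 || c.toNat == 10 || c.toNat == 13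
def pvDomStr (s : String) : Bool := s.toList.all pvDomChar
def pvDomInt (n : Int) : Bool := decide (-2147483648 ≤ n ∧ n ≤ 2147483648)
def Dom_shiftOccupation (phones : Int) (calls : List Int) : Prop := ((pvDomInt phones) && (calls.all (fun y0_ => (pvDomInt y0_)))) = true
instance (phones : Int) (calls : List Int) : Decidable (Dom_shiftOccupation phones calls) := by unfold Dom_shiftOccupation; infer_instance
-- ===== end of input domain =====

-- B replaces A's per-carry-level slicing recursion by one right-to-left scan plus one forward
-- pass building the cascaded suffix (objective: simpler). Note: Python A mutates calls in place
-- (calls[-1] += 1) when no carry occurs, B does not; the equivalence proved is about the return value only.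

-- ===== PORT A =====
-- literal transliteration of A: recursion on calls[:-1] (dropLast); calls[-1] = getLast;
-- the returned mutated list 'calls' with its last element incremented is dropLast ++ [last+1]
def shiftOccupation (phones : Int) (calls : List Int) : List Int :=
  if h : calls = [] then []
  else
    let lastWatcher := calls.getLast h
    if lastWatcher ≥ phones - 1 then
      let backwardsShift := shiftOccupation (phones - 1) calls.dropLast
      if backwardsShift = [] then []
      else backwardsShift ++ [backwardsShift.getLast! + 1]
    else
      calls.dropLast ++ [lastWatcher + 1]
termination_by calls.length
decreasing_by
  have : calls.length ≠ 0 := fun hl => h (List.eq_nil_of_length_eq_zero hl)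
  simp [List.length_dropLast]; omega

-- ===== PORT B =====
-- the while loop 'i = n-1; while i >= 0 and calls[i] >= phones - n + i: i -= 1' as a
-- downward recursion on the Nat j = i + 1 (j = 0 means i has reached -1)
def pvFindB (phones : Int) (calls : List Int) (n : Int) : Nat → Int
  | 0 => -1
  | Nat.succ j => if calls.getD j 0 ≥ phones - n + (j : Int) then pvFindB phones calls n j else (j : Int)

-- calls[:i] for 0 ≤ i → take i.toNat; the list comprehension over range(n - i) → List.range.map
def shiftOccupation_alt (phones : Int) (calls : List Int) : List Int :=
  let n : Int := calls.length
  let i := pvFindB phones calls n calls.length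
  if i < 0 then []
  else calls.take i.toNat ++ (List.range (calls.length - i.toNat)).map (fun (k : Nat) => calls.getD i.toNat 0 + 1 + (k : Int))

-- ===== PRECONDITION & SPEC =====
def Spec_shiftOccupation (phones : Int) (calls : List Int) (out : List Int) : Prop := out = shiftOccupation_alt phones calls
instance (phones : Int) (calls : List Int) (out : List Int) : Decidable (Spec_shiftOccupation phones calls out) := by unfold Spec_shiftOccupation; infer_instance

-- ===== CLAIM (what is proved, stated in full; the proofs are below) =====
def Claim_equal_shiftOccupation : Prop := ∀ (phones : Int) (calls : List Int), Dom_shiftOccupation phones calls → Spec_shiftOccupation phones calls (shiftOccupation phones calls)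

-- ===== LEMMAS AND PROOFS =====

theorem pvFindB_lt (phones : Int) (calls : List Int) (n : Int) (j : Nat) :
    -1 ≤ pvFindB phones calls n j ∧ pvFindB phones calls n j < (j : Int) := by
  induction j with
  | zero => simp [pvFindB]
  | succ j ih =>
    simp only [pvFindB]
    split
    · exact ⟨ih.1, by have := ih.2; push_cast; omega⟩
    · push_cast; omega

theorem pvFindB_shift (phones a : Int) (cs : List Int) (j : Nat) (hj : j ≤ cs.length) :
    pvFindB phones (cs ++ [a]) ((cs.length : Int) + 1) j = pvFindB (phones - 1) cs (cs.length : Int) j := by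
  induction j with
  | zero => rfl
  | succ j ih =>
    have hjl : j < cs.length := by omega
    simp only [pvFindB, List.getD_append _ _ _ _ hjl, ih (by omega)]
    have hcond : (phones - 1 - (cs.length : Int) + (j : Int)) = phones - ((cs.length : Int) + 1) + (j : Int) := by ring
    rw [hcond]

theorem getLast!_concat_int (cs : List Int) (a : Int) : (cs ++ [a]).getLast! = a := by
  rw [List.getLast!_eq_getLast?_getD, List.getLast?_concat]
  rfl

-- B satisfies A's recurrence on cs ++ [a]
theorem alt_concat (phones a : Int) (cs : List Int) :
    shiftOccupation_alt phones (cs ++ [a]) =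
      if a ≥ phones - 1 then
        (if shiftOccupation_alt (phones - 1) cs = [] then []
         else shiftOccupation_alt (phones - 1) cs ++ [(shiftOccupation_alt (phones - 1) cs).getLast! + 1])
      else cs ++ [a + 1] := by
  have hlen : (cs ++ [a]).length = cs.length + 1 := by simp
  have hgetD : (cs ++ [a]).getD cs.length 0 = a := by
    simp [List.getD_eq_getElem?_getD]
  simp only [shiftOccupation_alt, hlen]
  have hn : ((cs.length + 1 : Nat) : Int) = (cs.length : Int) + 1 := by push_cast; ring
  rw [hn]
  simp only [pvFindB, hgetD]
  have hcond : (phones - ((cs.length : Int) + 1) + (cs.length : Int)) = phones - 1 := by ring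
  rw [hcond]
  by_cases hge : a ≥ phones - 1
  · -- carry case
    rw [if_pos hge, if_pos hge, pvFindB_shift phones a cs cs.length le_rfl]
    set i := pvFindB (phones - 1) cs (cs.length : Int) cs.length with hi
    have hb := pvFindB_lt (phones - 1) cs (cs.length : Int) cs.length
    by_cases hneg : i < 0
    · simp [hneg]
    · rw [if_neg hneg, if_neg hneg]
      have hi0 : 0 ≤ i := by omega
      have hilt : i.toNat < cs.length := by omega
      have htake : (cs ++ [a]).take i.toNat = cs.take i.toNat := by
        rw [List.take_append_of_le_length (by omega)]
      have hgd : (cs ++ [a]).getD i.toNat 0 = cs.getD i.toNat 0 := List.getD_append _ _ _ _ hilt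
      have hm : cs.length + 1 - i.toNat = (cs.length - i.toNat) + 1 := by omega
      have hnonempty : cs.take i.toNat ++ (List.range (cs.length - i.toNat)).map
          (fun (k : Nat) => cs.getD i.toNat 0 + 1 + (k : Int)) ≠ [] := by
        apply List.append_ne_nil_of_right_ne_nil
        simp only [ne_eq, List.map_eq_nil_iff, List.range_eq_nil]
        omega
      rw [if_neg hnonempty, htake, hgd, hm, List.range_succ, List.map_append, List.map_singleton,
          ← List.append_assoc]
      congr 1
      -- getLast! of B's small result + 1 equals the new last element
      obtain ⟨m, hm2⟩ : ∃ m, cs.length - i.toNat = m + 1 := ⟨cs.length - i.toNat - 1, by omega⟩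
      rw [hm2, List.range_succ, List.map_append, List.map_singleton, ← List.append_assoc,
          getLast!_concat_int]
      have : (m : Int) + 1 = ((cs.length - i.toNat : Nat) : Int) := by
        rw [hm2]; push_cast; ring
      simp only [List.cons.injEq, and_true]
      omega
  · -- no carry: i = cs.length
    rw [if_neg hge, if_neg hge]
    have hnn : ¬ ((cs.length : Int) < 0) := by omega
    rw [if_neg hnn]
    have httoNat : ((cs.length : Int)).toNat = cs.length := by omega
    rw [httoNat, List.take_append_of_le_length le_rfl, List.take_length, hgetD]
    simp

theorem shiftOccupation_eq_alt (calls : List Int) (phones : Int) :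
    shiftOccupation phones calls = shiftOccupation_alt phones calls := by
  induction calls using List.reverseRecOn generalizing phones with
  | nil => rw [shiftOccupation]; rfl
  | append_singleton cs a ih =>
    have hne : cs ++ [a] ≠ [] := by simp
    rw [shiftOccupation, dif_neg hne, alt_concat]
    simp only [List.getLast_append_singleton, List.dropLast_concat]
    rw [ih]

-- ===== VERDICT (by name: the statement is the Claim_ definition above) =====
theorem shiftOccupation_spec : Claim_equal_shiftOccupation := by
  intro phones calls _
  exact shiftOccupation_eq_alt calls phones
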